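-- pv_equiv track=rewrite | github.com/mariusog/grocery_bot | grocery_bot/planner/spawn.py | _split_into_zones
-- ===== SOURCE A (Python) =====
-- def _split_into_zones(
--
--     item_ys: list[int],
--     num_bots: int,
-- ) -> list[list[int]]:
--     """Split item Y-rows into num_bots vertical zones."""
--     n_zones = min(num_bots, len(item_ys))
--     if n_zones <= 1:
--         return [item_ys]
--
--     zones: list[list[int]] = [[] for _ in range(n_zones)]
--     for i, y in enumerate(item_ys):
--         zone_idx = i * n_zones // len(item_ys)
--         zones[zone_idx].append(y)
--     return [z for z in zones if z]
-- ===== SOURCE B (Python) =====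
-- def _split_into_zones(
--     item_ys: list[int],
--     num_bots: int,
-- ) -> list[list[int]]:
--     """Split item Y-rows into num_bots vertical zones."""
--     L = len(item_ys)
--     n_zones = min(num_bots, L)
--     if n_zones <= 1:
--         return [item_ys]
--     return [
--         item_ys[(j * L + n_zones - 1) // n_zones : ((j + 1) * L + n_zones - 1) // n_zones]
--         for j in range(n_zones)
--     ]
-- ===== Notes on version B (the rewrite author's own statement) =====
-- stated objective: simpler
-- what changed: B computes each zone directly as a contiguous slice item_ys[ceil(j*L/n):ceil((j+1)*L/n)] for j in range(n), instead of preallocating n empty buckets, appending each element to bucket floor(i*n/L), and filtering out empty buckets.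
import Mathlib
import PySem

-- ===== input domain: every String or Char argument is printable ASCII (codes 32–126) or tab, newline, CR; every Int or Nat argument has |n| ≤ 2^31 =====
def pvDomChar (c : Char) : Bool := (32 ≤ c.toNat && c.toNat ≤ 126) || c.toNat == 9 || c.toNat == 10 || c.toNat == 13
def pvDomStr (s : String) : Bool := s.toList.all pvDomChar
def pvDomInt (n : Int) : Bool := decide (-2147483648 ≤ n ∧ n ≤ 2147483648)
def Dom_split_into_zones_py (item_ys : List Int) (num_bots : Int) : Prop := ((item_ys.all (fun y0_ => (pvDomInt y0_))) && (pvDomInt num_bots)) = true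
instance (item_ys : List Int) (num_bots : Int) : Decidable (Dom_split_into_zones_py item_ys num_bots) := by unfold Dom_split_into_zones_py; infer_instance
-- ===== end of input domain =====

-- B computes each zone directly as a slice with ceiling-division boundaries instead of
-- bucketing elements one by one into preallocated zone lists and filtering empties (objective: simpler).

-- ===== PORT A =====
-- zones[zone_idx].append(y) is ported as List.modify at zone_idx.toNat (zone_idx is a
-- nonnegative in-range index whenever this branch runs, so .toNat is exact here).
def split_into_zones_py (item_ys : List Int) (num_bots : Int) : List (List Int) :=
  let n_zones : Int := min num_bots (item_ys.length : Int)
  if n_zones ≤ 1 then [item_ys]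
  else
    let zones0 : List (List Int) := (List.range n_zones.toNat).map (fun _ => [])
    let zones := (PySem.List.enumerate item_ys).foldl
      (fun zs p =>
        let zone_idx := PySem.Int.floordiv (p.1 * n_zones) (item_ys.length : Int)
        zs.modify zone_idx.toNat (fun z => z ++ [p.2])) zones0
    zones.filter (fun z => !z.isEmpty)

-- ===== PORT B =====
def split_into_zones_py_alt (item_ys : List Int) (num_bots : Int) : List (List Int) :=
  let L : Int := item_ys.length
  let n_zones : Int := min num_bots L
  if n_zones ≤ 1 then [item_ys]
  else
    (PySem.List.pyRange 0 n_zones 1).map (fun j =>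
      PySem.List.slice item_ys
        (some (PySem.Int.floordiv (j * L + n_zones - 1) n_zones))
        (some (PySem.Int.floordiv ((j + 1) * L + n_zones - 1) n_zones)))

-- ===== PRECONDITION & SPEC =====
def Spec_split_into_zones_py (item_ys : List Int) (num_bots : Int) (out : List (List Int)) : Prop := out = split_into_zones_py_alt item_ys num_bots
instance (item_ys : List Int) (num_bots : Int) (out : List (List Int)) : Decidable (Spec_split_into_zones_py item_ys num_bots out) := by unfold Spec_split_into_zones_py; infer_instance

-- ===== CLAIM (what is proved, stated in full; the proofs are below) =====
def Claim_equal_split_into_zones_py : Prop := ∀ (item_ys : List Int) (num_bots : Int), Dom_split_into_zones_py item_ys num_bots → Spec_split_into_zones_py item_ys num_bots (split_into_zones_py item_ys num_bots)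

-- ===== LEMMAS AND PROOFS =====

-- The elements of `ys` (which sit at global indices s, s+1, … of the full list) that A's loop
-- sends to zone j, in order.
def pvSeg (L N : Nat) : List Int → Nat → Nat → List Int
  | [], _, _ => []
  | y :: ys, s, j => (if s * N / L = j then [y] else []) ++ pvSeg L N ys (s + 1) j

lemma pvModify_map_range (N : Nat) (g : Nat → List Int) (m : Nat)
    (f : List Int → List Int) :
    ((List.range N).map g).modify m f
      = (List.range N).map (fun j => if m = j then f (g j) else g j) := by
  apply List.ext_getElem
  · simp
  · intro i h1 h2
    simp only [List.length_map, List.length_range] at h1 h2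
    have hi : i < ((List.range N).map g).length := by simp; omega
    rw [List.getElem_modify f m ((List.range N).map g) i (by simpa using h2)]
    simp

lemma pvFoldA (L N : Nat) :
    ∀ (ys : List Int) (s : Nat) (g : Nat → List Int),
    (∀ k, k < ys.length → (s + k) * N / L < N) →
    (PySem.List.enumerate ys (s : Int)).foldl
        (fun zs p => zs.modify (PySem.Int.floordiv (p.1 * (N : Int)) (L : Int)).toNat
          (fun z => z ++ [p.2])) ((List.range N).map g)
      = (List.range N).map (fun j => g j ++ pvSeg L N ys s j) := by
  intro ys
  induction ys with
  | nil => intro s g _; simp [PySem.List.enumerate, pvSeg]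
  | cons y ys ih =>
    intro s g h
    rw [PySem.List.enumerate_cons]
    simp only [List.foldl_cons]
    have hidx : PySem.Int.floordiv ((s : Int) * (N : Int)) (L : Int) = ((s * N / L : Nat) : Int) := by
      rw [show ((s : Int) * (N : Int)) = ((s * N : Nat) : Int) by push_cast; ring]
      exact PySem.Int.floordiv_natCast _ _
    have hm : s * N / L < N := by
      have := h 0 (by simp)
      simpa using this
    rw [hidx]
    simp only [Int.toNat_natCast]
    rw [pvModify_map_range N g (s * N / L)]
    have hs1 : ((s : Int) + 1) = ((s + 1 : Nat) : Int) := by push_cast; ring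
    rw [hs1, ih (s + 1) _ (by
      intro k hk
      have := h (k + 1) (by simp; omega)
      have e : s + 1 + k = s + (k + 1) := by omega
      rw [e]; exact this)]
    apply List.map_congr_left
    intro j _
    by_cases hj : s * N / L = j
    · simp [pvSeg, hj]
    · simp [pvSeg, hj]

-- A segment selected by a condition that is an interval of indices is a drop/take slice.
lemma pvSeg_eq_slice (L N b c j : Nat)
    (hiff : ∀ s : Nat, s * N / L = j ↔ b ≤ s ∧ s < c) :
    ∀ (ys : List Int) (s : Nat),
    pvSeg L N ys s j = (ys.drop (b - s)).take (c - max b s) := by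
  intro ys
  induction ys with
  | nil => intro s; simp [pvSeg]
  | cons y ys ih =>
    intro s
    simp only [pvSeg, hiff]
    by_cases h1 : b ≤ s
    · by_cases h2 : s < c
      · have : b - s = 0 := by omega
        simp only [h1, h2, and_self, if_true, this, List.drop_zero]
        rw [ih (s + 1)]
        have e1 : c - max b s = (c - max b (s + 1)) + 1 := by omega
        have e2 : b - (s + 1) = 0 := by omega
        simp [e1, e2]
      · have e1 : c - max b s = 0 := by omega
        have e2 : c - max b (s + 1) = 0 := by omega
        simp only [h2, and_false, if_false, List.nil_append, ih (s + 1), e1, e2]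
        simp
    · have e0 : ¬ (b ≤ s ∧ s < c) := by omega
      have e1 : b - s = (b - (s + 1)) + 1 := by omega
      have e2 : max b s = b := by omega
      have e3 : max b (s + 1) = b := by omega
      simp only [e0, if_false, List.nil_append, ih (s + 1), e1, e2, e3]
      simp

lemma pvCeil_le_iff (N x i : Nat) (hN : 0 < N) : (x + N - 1) / N ≤ i ↔ x ≤ i * N := by
  rw [Nat.div_le_iff_le_mul_add_pred hN, Nat.mul_comm i N]
  omega

lemma pvDiv_eq_iff (L s N j : Nat) (hL : 0 < L) : s * N / L = j ↔ j * L ≤ s * N ∧ s * N < (j + 1) * L := by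
  constructor
  · rintro rfl
    have h2 := Nat.mod_lt (s * N) hL
    have h3 := Nat.div_add_mod (s * N) L
    rw [Nat.mul_comm (s * N / L) L, add_mul, one_mul, Nat.mul_comm (s * N / L) L]
    omega
  · intro ⟨h1, h2⟩
    have ha : j ≤ s * N / L := (Nat.le_div_iff_mul_le hL).mpr h1
    have hb : s * N / L < j + 1 := (Nat.div_lt_iff_lt_mul hL).mpr h2
    omega

-- the interval characterisation: floor(s*N/L) = j  ↔  ceil(jL/N) ≤ s < ceil((j+1)L/N)
lemma pvInterval (L N j : Nat) (hN : 0 < N) (hNL : N ≤ L) (s : Nat) :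
    s * N / L = j ↔ (j * L + N - 1) / N ≤ s ∧ s < ((j + 1) * L + N - 1) / N := by
  have hL : 0 < L := lt_of_lt_of_le hN hNL
  rw [pvDiv_eq_iff L s N j hL]
  have c1 : (j * L + N - 1) / N ≤ s ↔ j * L ≤ s * N := pvCeil_le_iff N (j * L) s hN
  have c2 : ((j + 1) * L + N - 1) / N ≤ s ↔ (j + 1) * L ≤ s * N := pvCeil_le_iff N ((j + 1) * L) s hN
  omega

lemma pvBound_lt (L N j : Nat) (hN : 0 < N) (hNL : N ≤ L) (hj : j < N) :
    (j * L + N - 1) / N < ((j + 1) * L + N - 1) / N ∧ ((j + 1) * L + N - 1) / N ≤ L := by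
  constructor
  · have h1 : ¬ (((j + 1) * L + N - 1) / N ≤ (j * L + N - 1) / N) := by
      rw [pvCeil_le_iff N ((j + 1) * L) _ hN]
      have hd := Nat.div_mul_le_self (j * L + N - 1) N
      have e : (j + 1) * L = j * L + L := by ring
      omega
    omega
  · rw [Nat.div_le_iff_le_mul_add_pred hN]
    have e : (j + 1) * L ≤ N * L := Nat.mul_le_mul_right L (by omega)
    omega

-- ===== VERDICT (by name: the statement is the Claim_ definition above) =====
theorem split_into_zones_py_spec : Claim_equal_split_into_zones_py := by
  unfold Claim_equal_split_into_zones_py Spec_split_into_zones_py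
  intro item_ys num_bots _
  unfold split_into_zones_py split_into_zones_py_alt
  by_cases hle : min num_bots (item_ys.length : Int) ≤ 1
  · simp [hle]
  · simp only [hle, if_false]
    set nI : Int := min num_bots (item_ys.length : Int) with hnI
    have hn2 : 2 ≤ nI := by omega
    have hnL : nI ≤ (item_ys.length : Int) := min_le_right _ _
    set N : Nat := nI.toNat with hN
    set L : Nat := item_ys.length with hL
    have hNpos : 0 < N := by omega
    have hNL : N ≤ L := by omega
    have hLpos : 0 < L := by omega
    have hcast : nI = (N : Int) := by omega
    -- A side: evaluate the fold
    have hA := pvFoldA L N item_ys 0 (fun _ => [])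
      (by intro k hk
          have e : (0 + k) * N = k * N := by ring
          rw [e]
          have hlt : k * N < N * L := by
            have : k * N < L * N := (Nat.mul_lt_mul_right hNpos).mpr (by omega)
            rw [Nat.mul_comm L N] at this
            exact this
          exact (Nat.div_lt_iff_lt_mul hLpos).mpr hlt)
    simp only [Nat.cast_zero] at hA
    rw [hcast]
    rw [hA]
    simp only [List.nil_append]
    -- each zone is the corresponding slice
    have hzone : ∀ j, j < N → pvSeg L N item_ys 0 j
        = (item_ys.drop ((j * L + N - 1) / N)).take
            (((j + 1) * L + N - 1) / N - (j * L + N - 1) / N) := by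
      intro j hj
      rw [pvSeg_eq_slice L N ((j * L + N - 1) / N) (((j + 1) * L + N - 1) / N) j
            (fun s => pvInterval L N j hNpos hNL s) item_ys 0]
      simp
    -- each zone is nonempty, so the filter keeps everything
    have hne : ∀ j, j < N → (pvSeg L N item_ys 0 j).isEmpty = false := by
      intro j hj
      rw [hzone j hj]
      obtain ⟨hlt, hle'⟩ := pvBound_lt L N j hNpos hNL hj
      have hdroplen : ((item_ys.drop ((j * L + N - 1) / N)).length) = L - (j * L + N - 1) / N := by
        simp [hL]
      rw [List.isEmpty_eq_false_iff_exists_mem]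
      have : 0 < ((item_ys.drop ((j * L + N - 1) / N)).take
          (((j + 1) * L + N - 1) / N - (j * L + N - 1) / N)).length := by
        rw [List.length_take, hdroplen]; omega
      exact List.exists_mem_of_length_pos this
    rw [List.filter_eq_self.mpr (by
      intro z hz
      rw [List.mem_map] at hz
      obtain ⟨j, hj, rfl⟩ := hz
      rw [List.mem_range] at hj
      simp [hne j hj])]
    -- B side: pyRange/map of slices
    rw [PySem.List.pyRange_zero_nat N, List.map_map]
    apply List.map_congr_left
    intro j hj
    rw [List.mem_range] at hj
    have e1 : ((j : Int) * (L : Int) + (N : Int) - 1) = (((j * L + N - 1 : Nat)) : Int) := by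
      omega
    have e2 : (((j : Int) + 1) * (L : Int) + (N : Int) - 1) = ((((j + 1) * L + N - 1 : Nat)) : Int) := by
      ring_nf
      omega
    simp only [Function.comp_apply, e1, e2, PySem.Int.floordiv_natCast,
      PySem.List.slice_natCast]
    rw [hzone j hj]
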